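-- pv_equiv track=rewrite | github.com/kkkkshi/Leetcode_python | 651. 4 Keys Keyboard.py | maxA
-- ===== SOURCE A (Python) =====
-- def maxA(N):
--     dp = [0] * (N + 1)
--     dp[0] = 0
--     for i in range(1, N+1):
--         # 按 A 键
--         dp[i] = dp[i - 1] + 1
--         for j in range(2, i):
--             # 全选 & 复制 dp[j-2]，连续粘贴 i - j 次
--             # 屏幕上共 dp[j - 2] * (i - j + 1) 个 A
--             dp[i] = max(dp[i], dp[j - 2] * (i - j + 1))
--     # N 次按键之后最多有几个 A？
--     return dp[N]
-- ===== SOURCE B (Python) =====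
-- def maxA(N):
--     # Linear DP: a useful paste-block multiplier never exceeds 5, so only
--     # multipliers 2..5 (looking back m+1 keystrokes) need to be checked.
--     dp = [0] * (N + 1)
--     for i in range(1, N + 1):
--         best = dp[i - 1] + 1
--         for m in range(2, 6):
--             if i - m - 1 >= 0:
--                 best = max(best, dp[i - m - 1] * m)
--         dp[i] = best
--     return dp[N]
-- ===== Notes on version B (the rewrite author's own statement) =====
-- stated objective: faster
-- what changed: Replaces A's O(N^2) inner scan over every copy point j with a constant-size inner loop over paste-block multipliers 2..5 (a multiplier of 6 or more is never optimal, since it can be split into two blocks with a larger product), giving a linear-time DP.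
import Mathlib
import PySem

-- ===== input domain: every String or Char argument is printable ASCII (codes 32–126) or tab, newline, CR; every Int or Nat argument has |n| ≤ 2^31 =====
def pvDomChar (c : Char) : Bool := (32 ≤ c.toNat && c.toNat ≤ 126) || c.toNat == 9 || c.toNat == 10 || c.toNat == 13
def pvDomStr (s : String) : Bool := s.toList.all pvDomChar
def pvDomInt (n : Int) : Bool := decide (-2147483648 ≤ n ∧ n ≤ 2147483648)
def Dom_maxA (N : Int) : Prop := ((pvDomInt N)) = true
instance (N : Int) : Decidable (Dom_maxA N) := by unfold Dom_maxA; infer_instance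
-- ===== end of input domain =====

-- B replaces A's O(N^2) inner scan over all copy points by a constant inner loop over
-- paste-block multipliers 2..5 (larger multipliers are never optimal), giving an O(N) DP.

-- ===== PORT A =====
-- inner 'for j in range(2, i)' loop body, wrapped around the initial dp[i] = dp[i-1]+1 assignment
def stepA (i : Int) (dp : List Int) : List Int :=
  (PySem.List.pyRange 2 i 1).foldl
    (fun dp j =>
      PySem.List.pySetD dp i
        (max (PySem.List.pyGetD dp i 0) (PySem.List.pyGetD dp (j - 2) 0 * (i - j + 1))))
    (PySem.List.pySetD dp i (PySem.List.pyGetD dp (i - 1) 0 + 1))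

def maxA (N : Int) : Int :=
  let dp0 := PySem.List.pySetD (List.replicate (N + 1).toNat (0 : Int)) 0 0
  let dp := (PySem.List.pyRange 1 (N + 1) 1).foldl (fun dp i => stepA i dp) dp0
  PySem.List.pyGetD dp N 0

-- ===== PORT B =====
-- 'best' accumulation: dp[i-1]+1 then multipliers m = 2..5 guarded by i-m-1 >= 0
def stepB (i : Int) (dp : List Int) : List Int :=
  PySem.List.pySetD dp i
    ((PySem.List.pyRange 2 6 1).foldl
      (fun best m =>
        if 0 ≤ i - m - 1 then max best (PySem.List.pyGetD dp (i - m - 1) 0 * m) else best)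
      (PySem.List.pyGetD dp (i - 1) 0 + 1))

def maxA_alt (N : Int) : Int :=
  let dp := (PySem.List.pyRange 1 (N + 1) 1).foldl (fun dp i => stepB i dp)
    (List.replicate (N + 1).toNat (0 : Int))
  PySem.List.pyGetD dp N 0

-- ===== PRECONDITION & SPEC =====
-- Pre_ excludes negative N, on which the Python A raises IndexError (indexing an empty dp list).
def Pre_maxA (N : Int) : Prop := 0 ≤ N
instance (N : Int) : Decidable (Pre_maxA N) := by unfold Pre_maxA; infer_instance
def pvWitness_maxA : Int := 7

def Spec_maxA (N : Int) (out : Int) : Prop := out = maxA_alt N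
instance (N : Int) (out : Int) : Decidable (Spec_maxA N out) := by unfold Spec_maxA; infer_instance

-- ===== CLAIM (what is proved, stated in full; the proofs are below) =====
def Claim_equal_maxA : Prop := ∀ (N : Int), Dom_maxA N → Pre_maxA N → Spec_maxA N (maxA N)

-- ===== LEMMAS AND PROOFS =====

-- the common value: g k = best count reachable with k keystrokes (B's recurrence, unrolled)
def g : Nat → Int
  | 0 => 0
  | 1 => 1
  | 2 => 2
  | 3 => 3
  | 4 => 4
  | 5 => 5
  | (n + 6) =>
      max (max (max (max (g (n + 5) + 1) (g (n + 3) * 2)) (g (n + 2) * 3)) (g (n + 1) * 4))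
        (g n * 5)

-- the dp list after the loop iterations i = 1 .. k have run (entries above k still 0)
def model (n k : Nat) : List Int :=
  (List.range (n + 1)).map (fun t => if t ≤ k then g t else 0)

lemma g_step_le (i : Nat) : g i + 1 ≤ g (i + 1) := by
  match i with
  | 0 | 1 | 2 | 3 | 4 => simp [g]
  | (n + 5) =>
    show g (n + 5) + 1 ≤ g (n + 6)
    simp only [g, le_max_iff]
    left; left; left; left; rfl

lemma g_nonneg (i : Nat) : 0 ≤ g i := by
  induction i with
  | zero => simp [g]
  | succ n ih => have := g_step_le n; omega

lemma g_paste5 (m i : Nat) (h2 : 2 ≤ m) (h5 : m ≤ 5) (hi : m + 1 ≤ i) :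
    g (i - m - 1) * m ≤ g i := by
  by_cases h6 : 6 ≤ i
  · obtain ⟨n, rfl⟩ : ∃ n, i = n + 6 := ⟨i - 6, by omega⟩
    interval_cases m
    · have : n + 6 - 2 - 1 = n + 3 := by omega
      rw [this]; simp only [g, le_max_iff]; push_cast; left; left; left; right; rfl
    · have : n + 6 - 3 - 1 = n + 2 := by omega
      rw [this]; simp only [g, le_max_iff]; push_cast; left; left; right; rfl
    · have : n + 6 - 4 - 1 = n + 1 := by omega
      rw [this]; simp only [g, le_max_iff]; push_cast; left; right; rfl
    · have : n + 6 - 5 - 1 = n := by omega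
      rw [this]; simp only [g, le_max_iff]; push_cast; right; rfl
  · interval_cases i <;> interval_cases m <;> simp [g]

lemma g_paste (m i : Nat) (h2 : 2 ≤ m) (hi : m + 1 ≤ i) : g (i - m - 1) * m ≤ g i := by
  induction m using Nat.strong_induction_on generalizing i with
  | _ m IH =>
    by_cases h5 : m ≤ 5
    · exact g_paste5 m i h2 h5 hi
    · have h3 : g (i - 2 - 1) * 2 ≤ g i := g_paste5 2 i (by omega) (by omega) (by omega)
      have hIH := IH (m - 3) (by omega) (i - 3) (by omega) (by omega)
      have hidx : i - 3 - (m - 3) - 1 = i - m - 1 := by omega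
      have hidx2 : i - 2 - 1 = i - 3 := by omega
      rw [hidx] at hIH
      rw [hidx2] at h3
      have hg : (0 : Int) ≤ g (i - m - 1) := g_nonneg _
      have hc : ((m - 3 : Nat) : Int) = (m : Int) - 3 := by omega
      have hm : (6 : Int) ≤ (m : Int) := by exact_mod_cast (by omega : 6 ≤ m)
      rw [hc] at hIH
      nlinarith [hIH, h3, hg, hm]

-- g (k+1) is at most any v dominating all of B's (equivalently A's bounded) options
lemma g_succ_le_of (k : Nat) (v : Int) (h0 : g k + 1 ≤ v)
    (h : ∀ m, 2 ≤ m → m ≤ 5 → m ≤ k → g (k - m) * m ≤ v) : g (k + 1) ≤ v := by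
  by_cases h5 : 5 ≤ k
  · obtain ⟨n, rfl⟩ : ∃ n, k = n + 5 := ⟨k - 5, by omega⟩
    show g (n + 6) ≤ v
    simp only [g, max_le_iff]
    refine ⟨⟨⟨⟨h0, ?_⟩, ?_⟩, ?_⟩, ?_⟩
    · have := h 2 (by omega) (by omega) (by omega)
      have e : n + 5 - 2 = n + 3 := by omega
      rw [e] at this; exact_mod_cast this
    · have := h 3 (by omega) (by omega) (by omega)
      have e : n + 5 - 3 = n + 2 := by omega
      rw [e] at this; exact_mod_cast this
    · have := h 4 (by omega) (by omega) (by omega)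
      have e : n + 5 - 4 = n + 1 := by omega
      rw [e] at this; exact_mod_cast this
    · have := h 5 (by omega) (by omega) (by omega)
      have e : n + 5 - 5 = n := by omega
      rw [e] at this; exact_mod_cast this
  · interval_cases k <;> simpa [g] using h0

lemma pyGetD_model (n k t : Nat) (ht : t ≤ n) :
    PySem.List.pyGetD (model n k) (t : Int) 0 = if t ≤ k then g t else 0 := by
  rw [PySem.List.pyGetD_natCast, model, PySem.List.getD_map_range _ _ _ _ (by omega)]

lemma length_model (n k : Nat) : (model n k).length = n + 1 := by
  simp [model]

lemma set_model (n k : Nat) : (model n k).set (k + 1) (g (k + 1)) = model n (k + 1) := by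
  apply List.ext_getElem
  · simp [model]
  · intro i h1 h2
    simp only [model, List.getElem_set, List.getElem_map, List.getElem_range]
    by_cases hset : k + 1 = i
    · subst hset; simp
    · rw [if_neg hset]
      by_cases hik : i ≤ k
      · rw [if_pos hik, if_pos (by omega)]
      · rw [if_neg hik, if_neg (by omega)]

lemma model_zero (n : Nat) : model n 0 = List.replicate (n + 1) 0 := by
  apply List.ext_getElem
  · simp [model]
  · intro i h1 h2
    simp only [model, List.getElem_map, List.getElem_range, List.getElem_replicate]
    split_ifs with h
    · interval_cases i; simp [g]
    · rfl

-- a fold of running maxes is bounded by any bound on its init and its terms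
lemma foldl_max_le {β : Type} (xs : List β) (f : β → Int) (init B : Int)
    (h0 : init ≤ B) (h : ∀ x ∈ xs, f x ≤ B) :
    xs.foldl (fun acc y => max acc (f y)) init ≤ B := by
  induction xs generalizing init with
  | nil => simpa using h0
  | cons x t ih =>
    simp only [List.foldl_cons]
    exact ih _ (max_le h0 (h x (by simp))) (fun y hy => h y (by simp [hy]))

-- A's inner loop only writes position k+1 and reads positions j-2 ≤ k-2: one body step
lemma bodyA_set (n k : Nat) (hk : k + 1 ≤ n) (c : Nat) (h2 : 2 ≤ c) (hck : c ≤ k) (A : Int) :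
    PySem.List.pySetD ((model n k).set (k + 1) A) ((k + 1 : Nat) : Int)
        (max (PySem.List.pyGetD ((model n k).set (k + 1) A) ((k + 1 : Nat) : Int) 0)
          (PySem.List.pyGetD ((model n k).set (k + 1) A) ((c : Int) - 2) 0 *
            (((k + 1 : Nat) : Int) - (c : Int) + 1)))
    = (model n k).set (k + 1)
        (max A (PySem.List.pyGetD (model n k) ((c : Int) - 2) 0 *
            (((k + 1 : Nat) : Int) - (c : Int) + 1))) := by
  have hlen : k + 1 < (model n k).length := by rw [length_model]; omega
  rw [← PySem.List.pySetD_natCast (model n k) (k + 1) A]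
  rw [PySem.List.pyGetD_pySetD_natCast _ _ _ _ _ hlen, if_pos rfl]
  have e1 : (c : Int) - 2 = ((c - 2 : Nat) : Int) := by omega
  rw [e1, PySem.List.pyGetD_pySetD_natCast _ _ _ _ _ hlen, if_neg (by omega)]
  rw [PySem.List.pySetD_natCast, PySem.List.pySetD_natCast, List.set_set]

-- A's inner loop as a whole: the dp entry at k+1 accumulates a running max over copy points
lemma innerA (n k : Nat) (hk : k + 1 ≤ n) (c : Nat) (hc : c ≤ k + 1) (acc : Int) :
    (PySem.List.pyRange 2 (c : Int) 1).foldl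
      (fun dp j =>
        PySem.List.pySetD dp ((k + 1 : Nat) : Int)
          (max (PySem.List.pyGetD dp ((k + 1 : Nat) : Int) 0)
            (PySem.List.pyGetD dp (j - 2) 0 * (((k + 1 : Nat) : Int) - j + 1))))
      ((model n k).set (k + 1) acc)
    = (model n k).set (k + 1)
        ((PySem.List.pyRange 2 (c : Int) 1).foldl
          (fun a j =>
            max a (PySem.List.pyGetD (model n k) (j - 2) 0 * (((k + 1 : Nat) : Int) - j + 1)))
          acc) := by
  revert hc
  induction c generalizing acc with
  | zero => intro hc; rw [PySem.List.pyRange_one_eq_nil (by omega)]; simp only [List.foldl_nil]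
  | succ c ih =>
    intro hc
    by_cases hc2 : c < 2
    · rw [PySem.List.pyRange_one_eq_nil (by omega)]; simp only [List.foldl_nil]
    · have hcast : ((c + 1 : Nat) : Int) = (c : Int) + 1 := by push_cast; ring
      rw [hcast, PySem.List.pyRange_one_succ_right (by omega), List.foldl_append,
        List.foldl_append, ih acc (by omega)]
      simp only [List.foldl_cons, List.foldl_nil]
      exact bodyA_set n k hk c (by omega) (by omega) _

lemma stepA_model (n k : Nat) (hk : k + 1 ≤ n) :
    stepA ((k + 1 : Nat) : Int) (model n k) = model n (k + 1) := by
  unfold stepA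
  have hi1 : ((k + 1 : Nat) : Int) - 1 = ((k : Nat) : Int) := by omega
  rw [hi1, pyGetD_model n k k (by omega), if_pos (le_refl k)]
  rw [PySem.List.pySetD_natCast]
  rw [innerA n k hk (k + 1) (le_refl _) (g k + 1)]
  have hval : (PySem.List.pyRange 2 ((k + 1 : Nat) : Int) 1).foldl
      (fun a j =>
        max a (PySem.List.pyGetD (model n k) (j - 2) 0 * (((k + 1 : Nat) : Int) - j + 1)))
      (g k + 1) = g (k + 1) := by
    apply le_antisymm
    · apply foldl_max_le
      · exact g_step_le k
      · intro j hj
        rw [PySem.List.mem_pyRange_one] at hj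
        obtain ⟨hj2, hjk⟩ := hj
        have e1 : j - 2 = ((j.toNat - 2 : Nat) : Int) := by omega
        have e2 : ((k + 1 : Nat) : Int) - j + 1 = ((k + 2 - j.toNat : Nat) : Int) := by omega
        rw [e1, e2, pyGetD_model n k (j.toNat - 2) (by omega), if_pos (by omega)]
        have hp := g_paste (k + 2 - j.toNat) (k + 1) (by omega) (by omega)
        have e3 : k + 1 - (k + 2 - j.toNat) - 1 = j.toNat - 2 := by omega
        rw [e3] at hp
        exact hp
    · apply g_succ_le_of
      · exact (PySem.List.le_foldl_max_int _ _ _).1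
      · intro m h2 h5 hmk
        have hj : ((k + 2 - m : Nat) : Int) ∈ PySem.List.pyRange 2 ((k + 1 : Nat) : Int) 1 :=
          PySem.List.mem_pyRange_one.mpr ⟨by omega, by omega⟩
        have hle := (PySem.List.le_foldl_max_int (PySem.List.pyRange 2 ((k + 1 : Nat) : Int) 1)
          (fun j => PySem.List.pyGetD (model n k) (j - 2) 0 * (((k + 1 : Nat) : Int) - j + 1))
          (g k + 1)).2 _ hj
        have e1 : ((k + 2 - m : Nat) : Int) - 2 = ((k - m : Nat) : Int) := by omega
        have e2 : ((k + 1 : Nat) : Int) - ((k + 2 - m : Nat) : Int) + 1 = ((m : Nat) : Int) := by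
          omega
        simp only at hle
        rw [e1, e2, pyGetD_model n k (k - m) (by omega), if_pos (by omega)] at hle
        exact hle
  rw [hval, set_model]

lemma pyRange26 : PySem.List.pyRange 2 6 1 = [2, 3, 4, 5] := by decide

lemma valB_eq (k : Nat) :
    ([2, 3, 4, 5] : List Nat).foldl
      (fun b m => if m ≤ k then max b (g (k - m) * (m : Int)) else b) (g k + 1) = g (k + 1) := by
  by_cases h5 : 5 ≤ k
  · obtain ⟨t, rfl⟩ : ∃ t, k = t + 5 := ⟨k - 5, by omega⟩
    simp only [List.foldl_cons, List.foldl_nil]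
    rw [if_pos (by omega), if_pos (by omega), if_pos (by omega), if_pos (by omega)]
    have e2 : t + 5 - 2 = t + 3 := by omega
    have e3 : t + 5 - 3 = t + 2 := by omega
    have e4 : t + 5 - 4 = t + 1 := by omega
    have e5 : t + 5 - 5 = t := by omega
    have e6 : t + 5 + 1 = t + 6 := by omega
    rw [e2, e3, e4, e5, e6]
    simp only [g]
    norm_num
  · interval_cases k <;> decide

lemma stepB_model (n k : Nat) (hk : k + 1 ≤ n) :
    stepB ((k + 1 : Nat) : Int) (model n k) = model n (k + 1) := by
  unfold stepB
  rw [pyRange26]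
  simp only [List.foldl_cons, List.foldl_nil]
  have hi1 : ((k + 1 : Nat) : Int) - 1 = ((k : Nat) : Int) := by omega
  rw [hi1, pyGetD_model n k k (by omega), if_pos (le_refl k)]
  have hstep : ∀ (b mI : Int) (mN : Nat), mI = (mN : Int) → 2 ≤ mN → mN ≤ 5 →
      (if 0 ≤ ((k + 1 : Nat) : Int) - mI - 1 then
        max b (PySem.List.pyGetD (model n k) (((k + 1 : Nat) : Int) - mI - 1) 0 * mI) else b)
      = if mN ≤ k then max b (g (k - mN) * (mN : Int)) else b := by
    intro b mI mN hm h2 h5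
    subst hm
    by_cases hmk : mN ≤ k
    · rw [if_pos (by omega), if_pos hmk]
      have e : ((k + 1 : Nat) : Int) - (mN : Int) - 1 = ((k - mN : Nat) : Int) := by omega
      rw [e, pyGetD_model n k (k - mN) (by omega), if_pos (by omega)]
    · rw [if_neg (by omega), if_neg hmk]
  rw [hstep _ 2 2 (by norm_num) (by norm_num) (by norm_num)]
  rw [hstep _ 3 3 (by norm_num) (by norm_num) (by norm_num)]
  rw [hstep _ 4 4 (by norm_num) (by norm_num) (by norm_num)]
  rw [hstep _ 5 5 (by norm_num) (by norm_num) (by norm_num)]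
  rw [PySem.List.pySetD_natCast]
  have hv := valB_eq k
  simp only [List.foldl_cons, List.foldl_nil] at hv
  rw [hv, set_model]

lemma loop_model (n : Nat) (step : Int → List Int → List Int)
    (hstep : ∀ k, k + 1 ≤ n → step ((k + 1 : Nat) : Int) (model n k) = model n (k + 1))
    (k : Nat) (hk : k ≤ n) :
    (PySem.List.pyRange 1 ((k : Int) + 1) 1).foldl (fun dp i => step i dp) (model n 0)
      = model n k := by
  induction k with
  | zero => rw [PySem.List.pyRange_one_eq_nil (by omega)]; simp only [List.foldl_nil]
  | succ k ih =>
    have hcast : ((k + 1 : Nat) : Int) + 1 = ((k : Int) + 1) + 1 := by push_cast; ring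
    rw [hcast, PySem.List.pyRange_one_succ_right (by omega), List.foldl_append, ih (by omega)]
    simp only [List.foldl_cons, List.foldl_nil]
    have hc2 : ((k : Int) + 1) = ((k + 1 : Nat) : Int) := by omega
    rw [hc2]
    exact hstep k hk

-- ===== VERDICT (by name: the statement is the Claim_ definition above) =====
theorem maxA_spec : Claim_equal_maxA := by
  intro N _ hpre
  obtain ⟨n, rfl⟩ : ∃ n : Nat, N = (n : Int) := ⟨N.toNat, (Int.toNat_of_nonneg hpre).symm⟩
  unfold Spec_maxA maxA maxA_alt
  have hrep : List.replicate ((n : Int) + 1).toNat (0 : Int) = model n 0 := by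
    rw [show ((n : Int) + 1).toNat = n + 1 from by omega, model_zero]
  have hdp0 : PySem.List.pySetD (List.replicate ((n : Int) + 1).toNat (0 : Int)) 0 0
      = model n 0 := by
    rw [hrep, show (0 : Int) = ((0 : Nat) : Int) from rfl, PySem.List.pySetD_natCast,
      model_zero, List.replicate_succ, List.set_cons_zero]
    norm_num
  simp only [hdp0]
  simp only [hrep]
  rw [loop_model n stepA (fun k hk => stepA_model n k hk) n le_rfl,
    loop_model n stepB (fun k hk => stepB_model n k hk) n le_rfl]
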